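-- pv_equiv track=rewrite | github.com/helenachi/interview_practice_problems | 196_hw/hw0.py | intersect_sum
-- ===== SOURCE A (Python) =====
-- def intersect_sum(ary1, ary2):
--     # a = [1, 2, 3, 3, 4]
--     # b = [3, 4, 5, 6, 8, 10, 12]
--     # smaller = a
--     # larger = b
--     # ---checking a[0] == 1
--     # 1 in b? --> no; sum = 0
--     # 2 in b? --> no; sum = 0
--
--     if not ary1 or not ary2:
--         return None
--
--     result = []
--     for elem in ary1:
--         if elem in ary2 and elem not in result:
--             result.append(elem)
--     return sum(result)
-- ===== SOURCE B (Python) =====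
-- def intersect_sum(ary1, ary2):
--     # sort both lists, then one merge pass summing each common value once
--     if not ary1 or not ary2:
--         return None
--     xs = sorted(ary1)
--     ys = sorted(ary2)
--     return _merge_sum(xs, ys)
--
-- def _merge_sum(xs, ys):
--     total = 0
--     while xs and ys:
--         if xs[0] < ys[0]:
--             xs = xs[1:]
--         elif ys[0] < xs[0]:
--             ys = ys[1:]
--         else:
--             v = xs[0]
--             total += v
--             while xs and xs[0] == v:
--                 xs = xs[1:]
--             while ys and ys[0] == v:
--                 ys = ys[1:]
--     return total
-- ===== Notes on version B (the rewrite author's own statement) =====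
-- stated objective: alternative
-- what changed: Replaces A's single scan of ary1 with 'in ary2' and 'not in result' list-membership checks by sorting both lists and summing each common value once in a two-pointer merge pass that skips duplicate runs.
import Mathlib
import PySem

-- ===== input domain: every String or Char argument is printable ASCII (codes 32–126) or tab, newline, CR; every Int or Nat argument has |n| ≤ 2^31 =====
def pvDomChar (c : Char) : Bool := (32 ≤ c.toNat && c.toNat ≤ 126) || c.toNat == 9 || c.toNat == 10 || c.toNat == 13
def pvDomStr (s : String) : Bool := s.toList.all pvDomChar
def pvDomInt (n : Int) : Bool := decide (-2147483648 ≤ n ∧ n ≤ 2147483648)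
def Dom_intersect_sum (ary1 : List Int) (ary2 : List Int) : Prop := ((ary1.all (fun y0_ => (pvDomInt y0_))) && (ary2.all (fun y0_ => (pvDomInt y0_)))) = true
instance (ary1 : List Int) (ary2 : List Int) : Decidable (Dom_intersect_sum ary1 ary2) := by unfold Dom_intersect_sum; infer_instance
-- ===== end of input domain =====

-- B sorts both lists and sums each common value once in a single merge pass, instead of A's quadratic scan of ary1 with list-membership and dedup checks; same None guard on empty inputs.
-- ===== PORT A =====
def intersect_sum (ary1 : List Int) (ary2 : List Int) : Option Int :=
  if ary1 = [] ∨ ary2 = [] then none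
  else
    let result := ary1.foldl (fun r e => if e ∈ ary2 ∧ e ∉ r then r ++ [e] else r) []
    some result.sum

-- ===== PORT B =====
-- while loop of _merge_sum transcribed as recursion on the two (shrinking) lists
def mergeSum : List Int → List Int → Int
  | [], _ => 0
  | _ :: _, [] => 0
  | x :: xs, y :: ys =>
    if x < y then mergeSum xs (y :: ys)
    else if y < x then mergeSum (x :: xs) ys
    else x + mergeSum ((x :: xs).dropWhile (· == x)) ((y :: ys).dropWhile (· == x))
termination_by xs ys => xs.length + ys.length
decreasing_by
  · simp
  · simp
  · have hxy : y = x := by omega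
    have h1 := List.length_dropWhile_le (· == x) xs
    have h2 := List.length_dropWhile_le (· == x) ys
    simp [hxy]
    omega

def intersect_sum_alt (ary1 : List Int) (ary2 : List Int) : Option Int :=
  if ary1 = [] ∨ ary2 = [] then none
  else
    let xs := PySem.List.sorted ary1 (fun x => x) false
    let ys := PySem.List.sorted ary2 (fun x => x) false
    some (mergeSum xs ys)

-- ===== PRECONDITION & SPEC =====
def Spec_intersect_sum (ary1 : List Int) (ary2 : List Int) (out : Option Int) : Prop := out = intersect_sum_alt ary1 ary2
instance (ary1 : List Int) (ary2 : List Int) (out : Option Int) : Decidable (Spec_intersect_sum ary1 ary2 out) := by unfold Spec_intersect_sum; infer_instance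

-- ===== CLAIM (what is proved, stated in full; the proofs are below) =====
def Claim_equal_intersect_sum : Prop := ∀ (ary1 : List Int) (ary2 : List Int), Dom_intersect_sum ary1 ary2 → Spec_intersect_sum ary1 ary2 (intersect_sum ary1 ary2)

-- ===== LEMMAS AND PROOFS =====

-- dropping the leading run of v from a list whose elements are all ≥ v removes exactly v
lemma dropEq_spec (v : Int) (l : List Int) (hp : l.Pairwise (· ≤ ·)) (hall : ∀ z ∈ l, v ≤ z) :
    v ∉ l.dropWhile (· == v) ∧ (l.dropWhile (· == v)).toFinset = l.toFinset \ {v} := by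
  induction l with
  | nil => simp
  | cons a t ih =>
    rcases List.pairwise_cons.mp hp with ⟨hat, hpt⟩
    by_cases hav : a = v
    · subst hav
      have hrec := ih hpt (fun z hz => le_trans (hall a (by simp)) (hat z hz))
      refine ⟨by simpa [List.dropWhile_cons] using hrec.1, ?_⟩
      rw [List.dropWhile_cons]
      simp only [beq_self_eq_true, if_pos]
      rw [hrec.2, List.toFinset_cons, Finset.insert_sdiff_of_mem _ (Finset.mem_singleton_self a)]
    · have hva : v < a := lt_of_le_of_ne (hall a (by simp)) (Ne.symm hav)
      have hvt : v ∉ t := fun hv => absurd (hat v hv) (by omega)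
      have hvn : v ∉ a :: t := by simp [hvt]; omega
      have hdw : (a :: t).dropWhile (· == v) = a :: t := by
        simp [hav]
      rw [hdw]
      exact ⟨hvn, by
        rw [Finset.sdiff_singleton_eq_erase, Finset.erase_eq_of_notMem (by simpa using hvn)]⟩

lemma mergeSum_eq (xs ys : List Int) (h1 : xs.Pairwise (· ≤ ·)) (h2 : ys.Pairwise (· ≤ ·)) :
    mergeSum xs ys = (xs.toFinset ∩ ys.toFinset).sum id := by
  fun_induction mergeSum xs ys with
  | case1 ys => simp
  | case2 x xs => simp
  | case3 x xs y ys hlt ih =>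
    rcases List.pairwise_cons.mp h1 with ⟨_, hxt⟩
    rcases List.pairwise_cons.mp h2 with ⟨hyt, _⟩
    have hxny : x ∉ insert y ys.toFinset := by
      simp only [Finset.mem_insert, List.mem_toFinset]
      rintro (rfl | hx)
      · omega
      · exact absurd (hyt x hx) (by omega)
    rw [ih hxt h2]
    simp only [List.toFinset_cons]
    rw [Finset.insert_inter_of_notMem hxny]
  | case4 x xs y ys hlt hgt ih =>
    rcases List.pairwise_cons.mp h1 with ⟨hxt, _⟩
    rcases List.pairwise_cons.mp h2 with ⟨_, hyt⟩
    have hynx : y ∉ insert x xs.toFinset := by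
      simp only [Finset.mem_insert, List.mem_toFinset]
      rintro (rfl | hy)
      · omega
      · exact absurd (hxt y hy) (by omega)
    rw [ih h1 hyt]
    simp only [List.toFinset_cons]
    have heq : insert x xs.toFinset ∩ insert y ys.toFinset = insert x xs.toFinset ∩ ys.toFinset := by
      rw [Finset.inter_comm, Finset.insert_inter_of_notMem hynx]
      exact Finset.inter_comm _ _
    rw [heq]
  | case5 x xs y ys hlt hgt ih =>
    have hxy : x = y := by omega
    subst hxy
    rcases List.pairwise_cons.mp h1 with ⟨hx1, _⟩
    rcases List.pairwise_cons.mp h2 with ⟨hx2, _⟩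
    have hall1 : ∀ z ∈ x :: xs, x ≤ z := by
      intro z hz; rw [List.mem_cons] at hz
      rcases hz with rfl | hz
      · exact le_refl _
      · exact hx1 z hz
    have hall2 : ∀ z ∈ x :: ys, x ≤ z := by
      intro z hz; rw [List.mem_cons] at hz
      rcases hz with rfl | hz
      · exact le_refl _
      · exact hx2 z hz
    have d1 := dropEq_spec x (x :: xs) h1 hall1
    have d2 := dropEq_spec x (x :: ys) h2 hall2
    have hs1 : ((x :: xs).dropWhile (· == x)).Pairwise (· ≤ ·) :=
      List.Pairwise.sublist (List.dropWhile_sublist _) h1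
    have hs2 : ((x :: ys).dropWhile (· == x)).Pairwise (· ≤ ·) :=
      List.Pairwise.sublist (List.dropWhile_sublist _) h2
    rw [ih hs1 hs2, d1.2, d2.2]
    have hmem : x ∈ (x :: xs).toFinset ∩ (x :: ys).toFinset := by simp
    have heq : ((x :: xs).toFinset \ {x}) ∩ ((x :: ys).toFinset \ {x})
        = ((x :: xs).toFinset ∩ (x :: ys).toFinset).erase x := by
      ext z
      simp only [Finset.mem_inter, Finset.mem_sdiff, Finset.mem_singleton, Finset.mem_erase]
      tauto
    rw [heq]
    simpa using Finset.add_sum_erase _ id hmem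

-- A's dedup loop: the accumulated list stays duplicate-free and collects exactly ary1 ∩ ary2
lemma foldlA_spec (ary2 : List Int) (l r : List Int) (hr : r.Nodup) :
    (l.foldl (fun r e => if e ∈ ary2 ∧ e ∉ r then r ++ [e] else r) r).Nodup ∧
    (l.foldl (fun r e => if e ∈ ary2 ∧ e ∉ r then r ++ [e] else r) r).toFinset
      = r.toFinset ∪ (l.toFinset ∩ ary2.toFinset) := by
  induction l generalizing r with
  | nil => simp [hr]
  | cons e l ih =>
    simp only [List.foldl_cons]
    by_cases he : e ∈ ary2 ∧ e ∉ r
    · rw [if_pos he]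
      have hr' : (r ++ [e]).Nodup := by
        simp [List.nodup_append, hr]
        exact fun a ha hae => he.2 (hae ▸ ha)
      obtain ⟨hn, hf⟩ := ih (r ++ [e]) hr'
      refine ⟨hn, ?_⟩
      rw [hf]
      have he1 := he.1
      ext z
      by_cases hze : z = e
      · subst hze
        simp [he1]
      · simp only [List.toFinset_append, List.toFinset_cons, List.toFinset_nil,
          Finset.mem_union, Finset.mem_inter, Finset.mem_insert, List.mem_toFinset,
          hze, false_or]
        tauto
    · rw [if_neg he]
      obtain ⟨hn, hf⟩ := ih r hr
      refine ⟨hn, ?_⟩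
      rw [hf]
      rcases not_and_or.mp he with h | h
      · ext z
        by_cases hze : z = e
        · subst hze
          simp only [Finset.mem_union, Finset.mem_inter, List.toFinset_cons,
            Finset.mem_insert, List.mem_toFinset, true_or, true_and]
          tauto
        · simp only [Finset.mem_union, Finset.mem_inter, List.toFinset_cons,
            Finset.mem_insert, List.mem_toFinset, hze, false_or]
      · rw [not_not] at h
        ext z
        by_cases hze : z = e
        · subst hze
          simp only [Finset.mem_union, Finset.mem_inter, List.toFinset_cons,
            Finset.mem_insert, List.mem_toFinset, true_or, true_and]
          tauto
        · simp only [Finset.mem_union, Finset.mem_inter, List.toFinset_cons,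
            Finset.mem_insert, List.mem_toFinset, hze, false_or]

-- ===== VERDICT (by name: the statement is the Claim_ definition above) =====
theorem intersect_sum_spec : Claim_equal_intersect_sum := by
  intro ary1 ary2 _
  unfold Spec_intersect_sum intersect_sum intersect_sum_alt
  by_cases h : ary1 = [] ∨ ary2 = []
  · simp [h]
  · simp only [h, if_neg, not_false_iff]
    obtain ⟨hnd, hfin⟩ := foldlA_spec ary2 ary1 [] List.nodup_nil
    have hB := mergeSum_eq (PySem.List.sorted ary1 (fun x => x) false)
      (PySem.List.sorted ary2 (fun x => x) false)
      (by simpa using PySem.List.sorted_pairwise ary1 (fun x => x))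
      (by simpa using PySem.List.sorted_pairwise ary2 (fun x => x))
    have hp1 : (PySem.List.sorted ary1 (fun x => x) false).toFinset = ary1.toFinset :=
      List.toFinset_eq_of_perm _ _ (PySem.List.sorted_perm ary1 (fun x => x) false)
    have hp2 : (PySem.List.sorted ary2 (fun x => x) false).toFinset = ary2.toFinset :=
      List.toFinset_eq_of_perm _ _ (PySem.List.sorted_perm ary2 (fun x => x) false)
    rw [hB, hp1, hp2]
    simp only [List.toFinset_nil, Finset.empty_union] at hfin
    congr 1
    have hsum := List.sum_toFinset (fun x => x)
      (l := ary1.foldl (fun r e => if e ∈ ary2 ∧ e ∉ r then r ++ [e] else r) []) hnd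
    rw [← hfin]
    simpa [id] using hsum.symm
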